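-- pv_equiv track=rewrite | github.com/Iceblaze9527/HackerRankAI | 3_morphology_dilation.py | count_dilation
-- ===== SOURCE A (Python) =====
-- def count_dilation(image, kernel):
--     n_rows = len(image)
--     n_cols = len(image[0])
--
--     kernel_center_x = len(kernel) // 2
--     kernel_center_y = len(kernel[0]) // 2
--
--     n_dilated = 0
--     for x in range(n_rows):
--         for y in range(n_cols):
--             if (image[x][y] == 0):
--                 is_to_dilate = False
--                 for dx in range(-kernel_center_x,kernel_center_x + 1):
--                     for dy in range(-kernel_center_y,kernel_center_y + 1):
--                         if (0 <= x+dx < n_rows) and (0 <= y+dy < n_cols):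
--                             if (image[x+dx][y+dy] == 1) and (kernel[kernel_center_x+dx][kernel_center_y+dy] == 1):
--                                 is_to_dilate = True
--                                 break
--                     if is_to_dilate:
--                         break
--                 if is_to_dilate:
--                     n_dilated += 1
--             else:
--                 n_dilated += 1
--
--     return n_dilated
-- ===== SOURCE B (Python) =====
-- def count_dilation(image, kernel):
--     n_rows = len(image)
--     n_cols = len(image[0])
--     cx = len(kernel) // 2
--     cy = len(kernel[0]) // 2
--     lit = set()
--     ones = []
--     for x in range(n_rows):
--         for y in range(n_cols):
--             v = image[x][y]
--             if v != 0:
--                 lit.add((x, y))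
--             if v == 1:
--                 ones.append((x, y))
--     for (a, b) in ones:
--         for dx in range(-cx, cx + 1):
--             for dy in range(-cy, cy + 1):
--                 if kernel[cx + dx][cy + dy] == 1:
--                     x, y = a - dx, b - dy
--                     if 0 <= x < n_rows and 0 <= y < n_cols:
--                         lit.add((x, y))
--     return len(lit)
-- ===== Notes on version B (the rewrite author's own statement) =====
-- stated objective: alternative
-- what changed: Instead of testing every grid pixel against every kernel offset (gather) and counting, B collects the 1-pixels in one pass and scatters each over the kernel's set cells into a coordinate set, returning the set's size; the kernel box is visited only per foreground pixel.
-- outside the precondition, e.g. on count_dilation([[1], [0]], [[1], [1]]): A returns 2, B raises IndexError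
import Mathlib
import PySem

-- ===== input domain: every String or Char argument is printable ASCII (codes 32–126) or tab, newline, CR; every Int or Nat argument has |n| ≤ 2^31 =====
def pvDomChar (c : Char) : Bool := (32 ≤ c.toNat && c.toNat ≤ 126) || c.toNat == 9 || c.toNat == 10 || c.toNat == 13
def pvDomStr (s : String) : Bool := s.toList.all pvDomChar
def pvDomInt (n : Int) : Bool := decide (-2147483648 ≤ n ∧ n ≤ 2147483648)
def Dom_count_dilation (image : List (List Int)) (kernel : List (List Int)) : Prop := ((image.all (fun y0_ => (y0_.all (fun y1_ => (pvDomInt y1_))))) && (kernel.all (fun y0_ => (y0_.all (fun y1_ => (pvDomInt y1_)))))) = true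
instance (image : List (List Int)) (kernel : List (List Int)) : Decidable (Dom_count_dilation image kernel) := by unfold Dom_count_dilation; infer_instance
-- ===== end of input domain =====

-- B replaces A's gather (every pixel × every kernel offset) by one pass collecting the 1-pixels
-- followed by a scatter of each 1-pixel over the kernel's cells into a coordinate set (alternative algorithm).

-- m[x][y] for Python's two-step indexing; both ports use it. The defaults are never reached
-- inside Pre_count_dilation (all indices are in range there), where Python would raise instead.
def pvCell (m : List (List Int)) (x y : Int) : Int :=
  PySem.List.pyGetD (PySem.List.pyGetD m x []) y 0

-- ===== PORT A =====
def count_dilation (image : List (List Int)) (kernel : List (List Int)) : Int :=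
  let n_rows : Int := image.length
  let n_cols : Int := (PySem.List.pyGetD image 0 []).length  -- image[0]: IndexError on empty image, excluded by Pre_
  let kcx : Int := PySem.Int.floordiv kernel.length 2
  let kcy : Int := PySem.Int.floordiv (PySem.List.pyGetD kernel 0 []).length 2
  (PySem.List.pyRange 0 n_rows 1).foldl (fun n x =>
    (PySem.List.pyRange 0 n_cols 1).foldl (fun n y =>
      if pvCell image x y == 0 then
        -- the two break-ed loops only set the flag, so they are the boolean fold
        let is_to_dilate :=
          (PySem.List.pyRange (-kcx) (kcx + 1) 1).foldl (fun f dx =>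
            f || (PySem.List.pyRange (-kcy) (kcy + 1) 1).foldl (fun g dy =>
              g || (decide (0 ≤ x + dx) && decide (x + dx < n_rows) &&
                    decide (0 ≤ y + dy) && decide (y + dy < n_cols) &&
                    (pvCell image (x + dx) (y + dy) == 1) &&
                    (pvCell kernel (kcx + dx) (kcy + dy) == 1))) false) false
        if is_to_dilate then n + 1 else n
      else n + 1) n) 0

-- ===== PORT B =====
def count_dilation_alt (image : List (List Int)) (kernel : List (List Int)) : Int :=
  let n_rows : Int := image.length
  let n_cols : Int := (PySem.List.pyGetD image 0 []).length
  let kcx : Int := PySem.Int.floordiv kernel.length 2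
  let kcy : Int := PySem.Int.floordiv (PySem.List.pyGetD kernel 0 []).length 2
  -- first pass: set of pixels lit in the input, and the list of 1-pixels
  let scan : PySem.Set (Int × Int) × List (Int × Int) :=
    (PySem.List.pyRange 0 n_rows 1).foldl (fun st x =>
      (PySem.List.pyRange 0 n_cols 1).foldl (fun st y =>
        let v := pvCell image x y
        let st1 := if v != 0 then (PySem.Set.add st.1 (x, y), st.2) else st
        if v == 1 then (st1.1, st1.2 ++ [(x, y)]) else st1) st)
      (PySem.Set.empty, [])
  -- scatter every 1-pixel over the kernel's set cells
  let lit : PySem.Set (Int × Int) :=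
    scan.2.foldl (fun s ab =>
      (PySem.List.pyRange (-kcx) (kcx + 1) 1).foldl (fun s dx =>
        (PySem.List.pyRange (-kcy) (kcy + 1) 1).foldl (fun s dy =>
          if pvCell kernel (kcx + dx) (kcy + dy) == 1 then
            if decide (0 ≤ ab.1 - dx) && decide (ab.1 - dx < n_rows) &&
               decide (0 ≤ ab.2 - dy) && decide (ab.2 - dy < n_cols) then
              PySem.Set.add s (ab.1 - dx, ab.2 - dy)
            else s
          else s) s) s) scan.1
  PySem.Set.len lit

-- ===== PRECONDITION & SPEC =====
-- Pre_ restricts to the natural domain: a nonempty image whose rows are at least as long as the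
-- first row, and a nonempty kernel that is either odd×odd with rows at least as long as its first
-- row, or arbitrary when the image holds no 1-pixel (then neither program reads the kernel).
-- Outside it Python A raises IndexError (empty image/kernel, a short image row), or — for
-- even-sized/ragged kernels with foreground pixels — whether A raises depends on the pixel data:
-- A indexes a nonexistent kernel cell exactly when some in-bounds foreground neighbour reaches it,
-- so A can still return on such kernels while B, which walks the whole kernel box per 1-pixel, raises.
def Pre_count_dilation (image : List (List Int)) (kernel : List (List Int)) : Prop :=
  image ≠ [] ∧ (∀ r ∈ image, (image.headI).length ≤ r.length) ∧
  kernel ≠ [] ∧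
  ((kernel.length % 2 = 1 ∧ (kernel.headI).length % 2 = 1 ∧
    (∀ r ∈ kernel, (kernel.headI).length ≤ r.length)) ∨
   (∀ r ∈ image, (1 : Int) ∉ r.take (image.headI).length))

instance (image : List (List Int)) (kernel : List (List Int)) : Decidable (Pre_count_dilation image kernel) := by
  unfold Pre_count_dilation; infer_instance

def pvWitness_count_dilation : List (List Int) × List (List Int) :=
  ([[0, 1, 0], [0, 0, 0]], [[1, 1, 1]])

def Spec_count_dilation (image : List (List Int)) (kernel : List (List Int)) (out : Int) : Prop := out = count_dilation_alt image kernel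
instance (image : List (List Int)) (kernel : List (List Int)) (out : Int) : Decidable (Spec_count_dilation image kernel out) := by unfold Spec_count_dilation; infer_instance

-- ===== CLAIM (what is proved, stated in full; the proofs are below) =====
def Claim_equal_count_dilation : Prop := ∀ (image : List (List Int)) (kernel : List (List Int)), Dom_count_dilation image kernel → Pre_count_dilation image kernel → Spec_count_dilation image kernel (count_dilation image kernel)

-- ===== LEMMAS AND PROOFS =====

-- membership / nodup of a fold of conditional set-insertions
theorem pv_mem_foldl_condAdd {α β : Type} [BEq β] [LawfulBEq β]
    (l : List α) (c : α → Bool) (h : α → β) (s₀ : PySem.Set β) (q : β) :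
    (q ∈ l.foldl (fun s x => if c x then PySem.Set.add s (h x) else s) s₀) ↔
      q ∈ s₀ ∨ ∃ x ∈ l, c x ∧ h x = q := by
  induction l generalizing s₀ with
  | nil => simp
  | cons a l ih =>
    simp only [List.foldl_cons, List.mem_cons]
    by_cases hc : c a
    · simp only [hc, if_true, ih, PySem.Set.mem_add]
      constructor
      · rintro (⟨hq | rfl⟩ | ⟨x, hx, hcx, rfl⟩)
        · exact Or.inl hq
        · exact Or.inr ⟨_, Or.inl rfl, hc, rfl⟩
        · exact Or.inr ⟨x, Or.inr hx, hcx, rfl⟩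
      · rintro (hq | ⟨x, (rfl | hx), hcx, rfl⟩)
        · exact Or.inl (Or.inl hq)
        · exact Or.inl (Or.inr rfl)
        · exact Or.inr ⟨x, hx, hcx, rfl⟩
    · rw [if_neg (by simp [hc])]; simp only [ih]
      constructor
      · rintro (hq | ⟨x, hx, hcx, rfl⟩)
        · exact Or.inl hq
        · exact Or.inr ⟨x, Or.inr hx, hcx, rfl⟩
      · rintro (hq | ⟨x, (rfl | hx), hcx, rfl⟩)
        · exact Or.inl hq
        · exact absurd hcx (by simp [hc])
        · exact Or.inr ⟨x, hx, hcx, rfl⟩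

theorem pv_nodup_foldl_condAdd {α β : Type} [BEq β] [LawfulBEq β]
    (l : List α) (c : α → Bool) (h : α → β) (s₀ : PySem.Set β) (hs : s₀.Nodup) :
    (l.foldl (fun s x => if c x then PySem.Set.add s (h x) else s) s₀).Nodup := by
  induction l generalizing s₀ with
  | nil => exact hs
  | cons a l ih =>
    simp only [List.foldl_cons]
    exact ih _ (by split <;> [exact PySem.Set.nodup_add _ _ hs; exact hs])

-- length of a filtered flatMap, summand by summand
theorem pv_length_filter_flatMap {α β : Type} (l : List α) (g : α → List β) (p : β → Bool) :
    ((l.flatMap g).filter p).length = (l.map (fun x => (((g x).filter p).length : Int))).sum := by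
  induction l with
  | nil => simp
  | cons a l ih => simp [List.flatMap_cons, List.filter_append, ih]

-- the boolean predicate both programs realise: pixel p of the grid is lit after dilation
def pvDilB (image kernel : List (List Int)) (nr nc kcx kcy : Int) (p : Int × Int) : Bool :=
  !(pvCell image p.1 p.2 == 0) ||
  (PySem.List.pyRange (-kcx) (kcx + 1) 1).any (fun dx =>
    (PySem.List.pyRange (-kcy) (kcy + 1) 1).any (fun dy =>
      decide (0 ≤ p.1 + dx) && decide (p.1 + dx < nr) &&
      decide (0 ≤ p.2 + dy) && decide (p.2 + dy < nc) &&
      (pvCell image (p.1 + dx) (p.2 + dy) == 1) && (pvCell kernel (kcx + dx) (kcy + dy) == 1)))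

-- the grid of coordinates both loops enumerate
def pvGrid (nr nc : Int) : List (Int × Int) :=
  (PySem.List.pyRange 0 nr 1).flatMap (fun x => (PySem.List.pyRange 0 nc 1).map (fun y => (x, y)))

theorem pv_foldl_or {α : Type} (l : List α) (f : α → Bool) (b : Bool) :
    l.foldl (fun g x => g || f x) b = (b || l.any f) := by
  induction l generalizing b with
  | nil => simp
  | cons a l ih => simp [List.foldl_cons, ih, Bool.or_assoc]

theorem pv_if_count (a b : Bool) (n : Int) :
    (if a then (if b then n + 1 else n) else n + 1) = (if (!a || b) then n + 1 else n) := by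
  cases a <;> cases b <;> simp

theorem pv_foldl_grid {γ : Type} (l1 l2 : List Int) (G : γ → Int × Int → γ) (init : γ) :
    l1.foldl (fun st x => l2.foldl (fun st y => G st (x, y)) st) init
      = ((l1.flatMap (fun x => l2.map (fun y => (x, y)))).foldl G init) := by
  simp [List.foldl_flatMap, List.foldl_map]

theorem pv_A_eq (image kernel : List (List Int)) :
    count_dilation image kernel =
      (((pvGrid (image.length : Int) ((PySem.List.pyGetD image 0 []).length : Int)).filter
        (pvDilB image kernel (image.length : Int) ((PySem.List.pyGetD image 0 []).length : Int)
          (PySem.Int.floordiv (kernel.length : Int) 2)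
          (PySem.Int.floordiv ((PySem.List.pyGetD kernel 0 []).length : Int) 2))).length : Int) := by
  unfold count_dilation
  simp only [pv_foldl_or, Bool.false_or, pv_if_count, PySem.List.foldl_if_add_one,
    PySem.List.foldl_add, zero_add]
  rw [pvGrid, pv_length_filter_flatMap]
  congr 1
  apply List.map_congr_left
  intro x hx
  rw [List.filter_map, List.length_map, ← List.countP_eq_length_filter]
  congr 1

theorem pv_if_if {γ : Type} (a b : Bool) (s t : γ) :
    (if a then (if b then t else s) else s) = (if (a && b) then t else s) := by
  cases a <;> cases b <;> simp

theorem pv_foldl_triple {α γ : Type} (l1 : List α) (l2 l3 : List Int) (G : γ → α × Int × Int → γ) (init : γ) :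
    l1.foldl (fun s a => l2.foldl (fun s dx => l3.foldl (fun s dy => G s (a, dx, dy)) s) s) init
      = ((l1.flatMap (fun a => l2.flatMap (fun dx => l3.map (fun dy => (a, dx, dy))))).foldl G init) := by
  simp [List.foldl_flatMap, List.foldl_map]

theorem pv_mem_grid (nr nc : Int) (p : Int × Int) :
    p ∈ pvGrid nr nc ↔ (0 ≤ p.1 ∧ p.1 < nr) ∧ (0 ≤ p.2 ∧ p.2 < nc) := by
  cases p with
  | mk a b =>
    simp only [pvGrid, List.mem_flatMap, List.mem_map, PySem.List.mem_pyRange_one]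
    constructor
    · rintro ⟨x, hx, y, hy, h⟩
      cases h; exact ⟨hx, hy⟩
    · rintro ⟨ha, hb⟩
      exact ⟨a, ha, b, hb, rfl⟩

theorem pv_nodup_grid (nr nc : Int) : (pvGrid nr nc).Nodup := by
  have h : pvGrid nr nc = (PySem.List.pyRange 0 nr 1) ×ˢ (PySem.List.pyRange 0 nc 1) := rfl
  rw [h]
  exact List.Nodup.product (PySem.List.nodup_pyRange_one 0 nr) (PySem.List.nodup_pyRange_one 0 nc)

theorem pv_B_eq (image kernel : List (List Int)) :
    count_dilation_alt image kernel =
      (((pvGrid (image.length : Int) ((PySem.List.pyGetD image 0 []).length : Int)).filter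
        (pvDilB image kernel (image.length : Int) ((PySem.List.pyGetD image 0 []).length : Int)
          (PySem.Int.floordiv (kernel.length : Int) 2)
          (PySem.Int.floordiv ((PySem.List.pyGetD kernel 0 []).length : Int) 2))).length : Int) := by
  obtain ⟨nr, hnr⟩ : ∃ v : Int, (image.length : Int) = v := ⟨_, rfl⟩
  obtain ⟨nc, hnc⟩ : ∃ v : Int, ((PySem.List.pyGetD image 0 []).length : Int) = v := ⟨_, rfl⟩
  obtain ⟨kcx, hkcx⟩ : ∃ v : Int, PySem.Int.floordiv (kernel.length : Int) 2 = v := ⟨_, rfl⟩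
  obtain ⟨kcy, hkcy⟩ : ∃ v : Int, PySem.Int.floordiv ((PySem.List.pyGetD kernel 0 []).length : Int) 2 = v := ⟨_, rfl⟩
  have e1 : count_dilation_alt image kernel =
      PySem.Set.len
        (((PySem.List.pyRange 0 (image.length : Int) 1).foldl (fun st x =>
            (PySem.List.pyRange 0 ((PySem.List.pyGetD image 0 []).length : Int) 1).foldl (fun st y =>
              let v := pvCell image x y
              let st1 := if v != 0 then (PySem.Set.add st.1 (x, y), st.2) else st
              if v == 1 then (st1.1, st1.2 ++ [(x, y)]) else st1) st)
            ((PySem.Set.empty, []) : PySem.Set (Int × Int) × List (Int × Int))).2.foldl (fun s ab =>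
          (PySem.List.pyRange (-(PySem.Int.floordiv (kernel.length : Int) 2)) ((PySem.Int.floordiv (kernel.length : Int) 2) + 1) 1).foldl (fun s dx =>
            (PySem.List.pyRange (-(PySem.Int.floordiv ((PySem.List.pyGetD kernel 0 []).length : Int) 2)) ((PySem.Int.floordiv ((PySem.List.pyGetD kernel 0 []).length : Int) 2) + 1) 1).foldl (fun s dy =>
              if pvCell kernel ((PySem.Int.floordiv (kernel.length : Int) 2) + dx) ((PySem.Int.floordiv ((PySem.List.pyGetD kernel 0 []).length : Int) 2) + dy) == 1 then
                if decide (0 ≤ ab.1 - dx) && decide (ab.1 - dx < (image.length : Int)) &&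
                   decide (0 ≤ ab.2 - dy) && decide (ab.2 - dy < ((PySem.List.pyGetD image 0 []).length : Int)) then
                  PySem.Set.add s (ab.1 - dx, ab.2 - dy)
                else s
              else s) s) s)
          ((PySem.List.pyRange 0 (image.length : Int) 1).foldl (fun st x =>
            (PySem.List.pyRange 0 ((PySem.List.pyGetD image 0 []).length : Int) 1).foldl (fun st y =>
              let v := pvCell image x y
              let st1 := if v != 0 then (PySem.Set.add st.1 (x, y), st.2) else st
              if v == 1 then (st1.1, st1.2 ++ [(x, y)]) else st1) st)
            ((PySem.Set.empty, []) : PySem.Set (Int × Int) × List (Int × Int))).1) := rfl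
  rw [e1, hnr, hnc, hkcx, hkcy]
  -- the double scan loop is a fold over the grid of pairs, componentwise
  have hscan :
      (PySem.List.pyRange 0 nr 1).foldl (fun st x =>
        (PySem.List.pyRange 0 nc 1).foldl (fun st y =>
          let v := pvCell image x y
          let st1 := if v != 0 then (PySem.Set.add st.1 (x, y), st.2) else st
          if v == 1 then (st1.1, st1.2 ++ [(x, y)]) else st1) st)
        ((PySem.Set.empty, []) : PySem.Set (Int × Int) × List (Int × Int))
      = ((pvGrid nr nc).foldl (fun s p => if pvCell image p.1 p.2 != 0 then PySem.Set.add s p else s) PySem.Set.empty,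
         (pvGrid nr nc).foldl (fun l p => if pvCell image p.1 p.2 == 1 then l ++ [p] else l) []) := by
    have h1 := pv_foldl_grid (PySem.List.pyRange 0 nr 1) (PySem.List.pyRange 0 nc 1)
      (fun (st : PySem.Set (Int × Int) × List (Int × Int)) p =>
        let v := pvCell image p.1 p.2
        let st1 := if v != 0 then (PySem.Set.add st.1 p, st.2) else st
        if v == 1 then (st1.1, st1.2 ++ [p]) else st1)
      ((PySem.Set.empty, []) : PySem.Set (Int × Int) × List (Int × Int))
    rw [show (fun (st : PySem.Set (Int × Int) × List (Int × Int)) (x : Int) =>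
          (PySem.List.pyRange 0 nc 1).foldl (fun st y =>
            let v := pvCell image x y
            let st1 := if v != 0 then (PySem.Set.add st.1 (x, y), st.2) else st
            if v == 1 then (st1.1, st1.2 ++ [(x, y)]) else st1) st)
        = (fun (st : PySem.Set (Int × Int) × List (Int × Int)) (x : Int) =>
          (PySem.List.pyRange 0 nc 1).foldl (fun st y =>
            (fun (st : PySem.Set (Int × Int) × List (Int × Int)) (p : Int × Int) =>
              let v := pvCell image p.1 p.2
              let st1 := if v != 0 then (PySem.Set.add st.1 p, st.2) else st
              if v == 1 then (st1.1, st1.2 ++ [p]) else st1) st (x, y)) st) from rfl]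
    rw [h1, ← pvGrid]
    have hstep : (fun (st : PySem.Set (Int × Int) × List (Int × Int)) (p : Int × Int) =>
          let v := pvCell image p.1 p.2
          let st1 := if v != 0 then (PySem.Set.add st.1 p, st.2) else st
          if v == 1 then (st1.1, st1.2 ++ [p]) else st1)
        = (fun (st : PySem.Set (Int × Int) × List (Int × Int)) (p : Int × Int) =>
          ((fun (s : PySem.Set (Int × Int)) (p : Int × Int) => if pvCell image p.1 p.2 != 0 then PySem.Set.add s p else s) st.1 p,
           (fun (l : List (Int × Int)) (p : Int × Int) => if pvCell image p.1 p.2 == 1 then l ++ [p] else l) st.2 p)) := by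
      funext st p
      by_cases h0 : pvCell image p.1 p.2 != 0 <;> by_cases h1v : pvCell image p.1 p.2 == 1 <;>
        simp [h0, h1v]
    rw [hstep,
      PySem.List.foldl_prod_mk
        (f := fun (s : PySem.Set (Int × Int)) (p : Int × Int) => if pvCell image p.1 p.2 != 0 then PySem.Set.add s p else s)
        (g := fun (l : List (Int × Int)) (p : Int × Int) => if pvCell image p.1 p.2 == 1 then l ++ [p] else l)]
  rw [hscan]
  -- flatten the scatter loops into one fold over (pixel, offset) triples
  have e2 : (((pvGrid nr nc).foldl (fun s p => if pvCell image p.1 p.2 != 0 then PySem.Set.add s p else s) PySem.Set.empty,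
         (pvGrid nr nc).foldl (fun l p => if pvCell image p.1 p.2 == 1 then l ++ [p] else l) []) :
           PySem.Set (Int × Int) × List (Int × Int)).2.foldl (fun s ab =>
        (PySem.List.pyRange (-kcx) (kcx + 1) 1).foldl (fun s dx =>
          (PySem.List.pyRange (-kcy) (kcy + 1) 1).foldl (fun s dy =>
            if pvCell kernel (kcx + dx) (kcy + dy) == 1 then
              if decide (0 ≤ ab.1 - dx) && decide (ab.1 - dx < nr) &&
                 decide (0 ≤ ab.2 - dy) && decide (ab.2 - dy < nc) then
                PySem.Set.add s (ab.1 - dx, ab.2 - dy)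
              else s
            else s) s) s)
        (((pvGrid nr nc).foldl (fun s p => if pvCell image p.1 p.2 != 0 then PySem.Set.add s p else s) PySem.Set.empty,
         (pvGrid nr nc).foldl (fun l p => if pvCell image p.1 p.2 == 1 then l ++ [p] else l) []) :
           PySem.Set (Int × Int) × List (Int × Int)).1
      = (((pvGrid nr nc).foldl (fun l p => if pvCell image p.1 p.2 == 1 then l ++ [p] else l) []).flatMap (fun ab =>
          (PySem.List.pyRange (-kcx) (kcx + 1) 1).flatMap (fun dx =>
            (PySem.List.pyRange (-kcy) (kcy + 1) 1).map (fun dy => (ab, dx, dy))))).foldl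
          (fun s t =>
            if (pvCell kernel (kcx + t.2.1) (kcy + t.2.2) == 1) &&
               (decide (0 ≤ t.1.1 - t.2.1) && decide (t.1.1 - t.2.1 < nr) &&
                decide (0 ≤ t.1.2 - t.2.2) && decide (t.1.2 - t.2.2 < nc)) then
              PySem.Set.add s (t.1.1 - t.2.1, t.1.2 - t.2.2)
            else s)
          ((pvGrid nr nc).foldl (fun s p => if pvCell image p.1 p.2 != 0 then PySem.Set.add s p else s) PySem.Set.empty) := by
    rw [show (((pvGrid nr nc).foldl (fun s p => if pvCell image p.1 p.2 != 0 then PySem.Set.add s p else s) PySem.Set.empty,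
         (pvGrid nr nc).foldl (fun l p => if pvCell image p.1 p.2 == 1 then l ++ [p] else l) []) :
           PySem.Set (Int × Int) × List (Int × Int)).2 = (pvGrid nr nc).foldl (fun l p => if pvCell image p.1 p.2 == 1 then l ++ [p] else l) [] from rfl]
    rw [show (((pvGrid nr nc).foldl (fun s p => if pvCell image p.1 p.2 != 0 then PySem.Set.add s p else s) PySem.Set.empty,
         (pvGrid nr nc).foldl (fun l p => if pvCell image p.1 p.2 == 1 then l ++ [p] else l) []) :
           PySem.Set (Int × Int) × List (Int × Int)).1 = (pvGrid nr nc).foldl (fun s p => if pvCell image p.1 p.2 != 0 then PySem.Set.add s p else s) PySem.Set.empty from rfl]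
    rw [show (fun (s : PySem.Set (Int × Int)) (ab : Int × Int) =>
        (PySem.List.pyRange (-kcx) (kcx + 1) 1).foldl (fun s dx =>
          (PySem.List.pyRange (-kcy) (kcy + 1) 1).foldl (fun s dy =>
            if pvCell kernel (kcx + dx) (kcy + dy) == 1 then
              if decide (0 ≤ ab.1 - dx) && decide (ab.1 - dx < nr) &&
                 decide (0 ≤ ab.2 - dy) && decide (ab.2 - dy < nc) then
                PySem.Set.add s (ab.1 - dx, ab.2 - dy)
              else s
            else s) s) s)
      = (fun (s : PySem.Set (Int × Int)) (ab : Int × Int) =>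
        (PySem.List.pyRange (-kcx) (kcx + 1) 1).foldl (fun s dx =>
          (PySem.List.pyRange (-kcy) (kcy + 1) 1).foldl (fun s dy =>
            (fun (s : PySem.Set (Int × Int)) (t : (Int × Int) × Int × Int) =>
              if pvCell kernel (kcx + t.2.1) (kcy + t.2.2) == 1 then
                if decide (0 ≤ t.1.1 - t.2.1) && decide (t.1.1 - t.2.1 < nr) &&
                   decide (0 ≤ t.1.2 - t.2.2) && decide (t.1.2 - t.2.2 < nc) then
                  PySem.Set.add s (t.1.1 - t.2.1, t.1.2 - t.2.2)
                else s
              else s) s (ab, dx, dy)) s) s) from rfl]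
    rw [pv_foldl_triple _ _ _
      (fun (s : PySem.Set (Int × Int)) (t : (Int × Int) × Int × Int) =>
        if pvCell kernel (kcx + t.2.1) (kcy + t.2.2) == 1 then
          if decide (0 ≤ t.1.1 - t.2.1) && decide (t.1.1 - t.2.1 < nr) &&
             decide (0 ≤ t.1.2 - t.2.2) && decide (t.1.2 - t.2.2 < nc) then
            PySem.Set.add s (t.1.1 - t.2.1, t.1.2 - t.2.2)
          else s
        else s) _]
    apply PySem.List.foldl_congr_mem
    intro acc t _
    exact pv_if_if _ _ _ _
  rw [e2]
  have hS1 : ∀ q : Int × Int,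
      q ∈ (pvGrid nr nc).foldl (fun s p => if pvCell image p.1 p.2 != 0 then PySem.Set.add s p else s) PySem.Set.empty ↔
        q ∈ PySem.Set.empty ∨ ∃ p ∈ pvGrid nr nc, (pvCell image p.1 p.2 != 0) ∧ p = q :=
    fun q => pv_mem_foldl_condAdd (pvGrid nr nc) (fun p => pvCell image p.1 p.2 != 0) (fun p => p) PySem.Set.empty q
  have hnodupS1 : ((pvGrid nr nc).foldl (fun s p => if pvCell image p.1 p.2 != 0 then PySem.Set.add s p else s) PySem.Set.empty).Nodup :=
    pv_nodup_foldl_condAdd (pvGrid nr nc) (fun p => pvCell image p.1 p.2 != 0) (fun p => p) PySem.Set.empty List.nodup_nil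
  have hnodupLit := pv_nodup_foldl_condAdd
    (((pvGrid nr nc).foldl (fun l p => if pvCell image p.1 p.2 == 1 then l ++ [p] else l) []).flatMap (fun ab =>
      (PySem.List.pyRange (-kcx) (kcx + 1) 1).flatMap (fun dx =>
        (PySem.List.pyRange (-kcy) (kcy + 1) 1).map (fun dy => (ab, dx, dy)))))
    (fun t => (pvCell kernel (kcx + t.2.1) (kcy + t.2.2) == 1) &&
               (decide (0 ≤ t.1.1 - t.2.1) && decide (t.1.1 - t.2.1 < nr) &&
                decide (0 ≤ t.1.2 - t.2.2) && decide (t.1.2 - t.2.2 < nc)))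
    (fun t => (t.1.1 - t.2.1, t.1.2 - t.2.2)) _ hnodupS1
  have hnodupF : ((pvGrid nr nc).filter (pvDilB image kernel nr nc kcx kcy)).Nodup :=
    (pv_nodup_grid nr nc).filter _
  have hmem : ∀ q : Int × Int,
      q ∈ (((pvGrid nr nc).foldl (fun l p => if pvCell image p.1 p.2 == 1 then l ++ [p] else l) []).flatMap (fun ab =>
          (PySem.List.pyRange (-kcx) (kcx + 1) 1).flatMap (fun dx =>
            (PySem.List.pyRange (-kcy) (kcy + 1) 1).map (fun dy => (ab, dx, dy))))).foldl
          (fun s t =>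
            if (pvCell kernel (kcx + t.2.1) (kcy + t.2.2) == 1) &&
               (decide (0 ≤ t.1.1 - t.2.1) && decide (t.1.1 - t.2.1 < nr) &&
                decide (0 ≤ t.1.2 - t.2.2) && decide (t.1.2 - t.2.2 < nc)) then
              PySem.Set.add s (t.1.1 - t.2.1, t.1.2 - t.2.2)
            else s)
          ((pvGrid nr nc).foldl (fun s p => if pvCell image p.1 p.2 != 0 then PySem.Set.add s p else s) PySem.Set.empty) ↔
        q ∈ (pvGrid nr nc).filter (pvDilB image kernel nr nc kcx kcy) := by
    intro q
    rw [pv_mem_foldl_condAdd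
      (((pvGrid nr nc).foldl (fun l p => if pvCell image p.1 p.2 == 1 then l ++ [p] else l) []).flatMap (fun ab =>
        (PySem.List.pyRange (-kcx) (kcx + 1) 1).flatMap (fun dx =>
          (PySem.List.pyRange (-kcy) (kcy + 1) 1).map (fun dy => (ab, dx, dy)))))
      (fun t => (pvCell kernel (kcx + t.2.1) (kcy + t.2.2) == 1) &&
               (decide (0 ≤ t.1.1 - t.2.1) && decide (t.1.1 - t.2.1 < nr) &&
                decide (0 ≤ t.1.2 - t.2.2) && decide (t.1.2 - t.2.2 < nc)))
      (fun t => (t.1.1 - t.2.1, t.1.2 - t.2.2))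
      ((pvGrid nr nc).foldl (fun s p => if pvCell image p.1 p.2 != 0 then PySem.Set.add s p else s) PySem.Set.empty)
      q, hS1, List.mem_filter]
    rw [PySem.List.foldl_append_if_eq_filter, List.nil_append]
    simp only [pvDilB, List.mem_flatMap, List.mem_map, List.mem_filter, pv_mem_grid,
      PySem.List.mem_pyRange_one, List.any_eq_true, Bool.or_eq_true, Bool.and_eq_true,
      decide_eq_true_eq, beq_iff_eq, bne_iff_ne, Bool.not_eq_true', PySem.Set.empty,
      List.not_mem_nil, false_or, beq_eq_false_iff_ne]
    constructor
    · rintro (⟨p, hpg, hv, rfl⟩ | ⟨t, ⟨a, ⟨hag, ha1⟩, dx, hdx, dy, hdy, rfl⟩, ⟨hker, hb⟩, rfl⟩)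
      · exact ⟨hpg, Or.inl hv⟩
      · have e1 : a.1 - dx + dx = a.1 := by ring
        have e2 : a.2 - dy + dy = a.2 := by ring
        refine ⟨⟨⟨hb.1.1.1, hb.1.1.2⟩, hb.1.2, hb.2⟩, Or.inr ⟨dx, hdx, dy, hdy, ?_, hker⟩⟩
        rw [e1, e2]
        exact ⟨⟨⟨⟨hag.1.1, hag.1.2⟩, hag.2.1⟩, hag.2.2⟩, ha1⟩
    · rintro ⟨hqg, hv | ⟨dx, hdx, dy, hdy, ⟨hbnds, h1⟩, hker⟩⟩
      · exact Or.inl ⟨q, hqg, hv, rfl⟩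
      · right
        have e1 : q.1 + dx - dx = q.1 := by ring
        have e2 : q.2 + dy - dy = q.2 := by ring
        refine ⟨((q.1 + dx, q.2 + dy), dx, dy),
          ⟨(q.1 + dx, q.2 + dy), ⟨⟨⟨hbnds.1.1.1, hbnds.1.1.2⟩, hbnds.1.2, hbnds.2⟩, h1⟩,
            dx, hdx, dy, hdy, rfl⟩, ⟨hker, ?_⟩, ?_⟩
        · rw [e1, e2]
          exact ⟨⟨⟨hqg.1.1, hqg.1.2⟩, hqg.2.1⟩, hqg.2.2⟩
        · show (q.1 + dx - dx, q.2 + dy - dy) = q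
          rw [e1, e2]
  have hperm := (List.perm_ext_iff_of_nodup hnodupLit hnodupF).mpr hmem
  show (_ : PySem.Set (Int × Int)).len = _
  rw [PySem.Set.len, hperm.length_eq]



-- ===== VERDICT (by name: the statement is the Claim_ definition above) =====
-- The two ports in fact compute the same value on every input; the Pre_ hypothesis is not needed
-- for the equality itself (it delimits where the ports are faithful to the Python programs).
theorem count_dilation_spec : Claim_equal_count_dilation := by
  intro image kernel _ _
  show count_dilation image kernel = count_dilation_alt image kernel
  rw [pv_A_eq, pv_B_eq]
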